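-- pv_equiv track=rewrite | github.com/smartinsert/CodingProblem | amazon/merge_overlapping_intervals.py | rec_rearrange
-- ===== SOURCE A (Python) =====
-- def rec_rearrange(target_string, result=None):
--     if len(target_string) <= 1:
--         return target_string
--     if not result:
--         result = list()
--     if target_string[0] == target_string[1]:
--         result.append(target_string[0])
--     return rec_rearrange(target_string[1:]) + (result.pop() if result else '')
-- ===== SOURCE B (Python) =====
-- def rec_rearrange(target_string, result=None):
--     if len(target_string) <= 1:
--         return target_string
--     kept = [a for a, b in zip(target_string, target_string[1:]) if a == b]
--     return target_string[-1] + ''.join(reversed(kept))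
-- ===== Notes on version B (the rewrite author's own statement) =====
-- stated objective: simpler
-- what changed: Replaces A's per-character recursion (slice + append/pop accumulator list per frame) with a single comprehension over adjacent pairs; Pre_ excludes calls passing a non-empty result list when the first two characters differ, where A pops the caller's accumulator into the output (mutating the argument) - behaviour on a leftover internal-helper argument that no caller would specify.
-- outside the precondition, e.g. on rec_rearrange('ab', ['x']): A returns 'bx', B returns 'b'; on rec_rearrange('ab', ['']): A returns 'b', B returns 'b'
import Mathlib
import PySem

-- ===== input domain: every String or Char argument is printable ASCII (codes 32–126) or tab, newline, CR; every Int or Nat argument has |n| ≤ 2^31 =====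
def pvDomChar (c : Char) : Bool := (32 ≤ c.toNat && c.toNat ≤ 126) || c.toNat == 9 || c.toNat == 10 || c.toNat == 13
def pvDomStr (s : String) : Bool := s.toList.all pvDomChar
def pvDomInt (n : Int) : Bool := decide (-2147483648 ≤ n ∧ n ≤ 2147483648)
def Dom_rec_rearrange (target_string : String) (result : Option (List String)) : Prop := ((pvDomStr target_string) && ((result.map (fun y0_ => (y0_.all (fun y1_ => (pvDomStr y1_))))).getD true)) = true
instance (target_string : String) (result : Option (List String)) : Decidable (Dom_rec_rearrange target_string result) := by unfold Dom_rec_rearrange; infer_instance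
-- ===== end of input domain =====

-- B replaces A's per-character recursion by one pass over adjacent pairs (objective: simpler); the equivalence is
-- about the RETURN value (on the admitted inputs A performs no net mutation of `result`; calls where A pops the
-- caller's list are excluded by Pre_).

-- ===== PORT A =====
-- literal transliteration of A's recursion; strings as List Char, `result` strings' contents kept as String
def recAuxA (cs : List Char) (result : Option (List String)) : List Char :=
  if _h : cs.length ≤ 1 then cs
  else
    -- `if not result: result = list()`
    let res : List (List Char) := match result with
      | none => []
      | some r => if r.isEmpty then [] else r.map String.toList
    -- `if target_string[0] == target_string[1]: result.append(target_string[0])`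
    let res : List (List Char) := if cs[0]! = cs[1]! then res ++ [[cs[0]!]] else res
    -- `return rec_rearrange(target_string[1:]) + (result.pop() if result else '')`
    recAuxA cs.tail none ++ (res.getLast?.getD [])
termination_by cs.length
decreasing_by simp [List.length_tail]; omega

def rec_rearrange (target_string : String) (result : Option (List String)) : String :=
  String.ofList (recAuxA target_string.toList result)

-- ===== PORT B =====
def rec_rearrange_alt (target_string : String) (result : Option (List String)) : String :=
  let s := target_string.toList
  if s.length ≤ 1 then target_string
  else
    -- kept = [a for a, b in zip(s, s[1:]) if a == b]
    let kept := (s.zip s.tail).filterMap (fun ab => if ab.1 = ab.2 then some ab.1 else none)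
    -- return s[-1] + ''.join(reversed(kept))
    String.ofList (s.getLast! :: kept.reverse)

-- ===== PRECONDITION & SPEC =====
-- Pre_ excludes calls that pass a NON-EMPTY result list when the first two characters differ: result is the
-- recursion's internal accumulator, and on a top-level call with leftover content A pops its last element into
-- the output and mutates the caller's list — behaviour no caller would specify; B ignores the leftover argument.
def Pre_rec_rearrange (target_string : String) (result : Option (List String)) : Prop :=
  result.getD [] ≠ [] → (target_string.toList.length ≤ 1 ∨ target_string.toList[0]! = target_string.toList[1]!)
instance (target_string : String) (result : Option (List String)) : Decidable (Pre_rec_rearrange target_string result) := by unfold Pre_rec_rearrange; infer_instance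

def pvWitness_rec_rearrange : String × Option (List String) := ("hello", none)

def Spec_rec_rearrange (target_string : String) (result : Option (List String)) (out : String) : Prop := out = rec_rearrange_alt target_string result
instance (target_string : String) (result : Option (List String)) (out : String) : Decidable (Spec_rec_rearrange target_string result out) := by unfold Spec_rec_rearrange; infer_instance

-- ===== CLAIM =====
def Claim_equal_rec_rearrange : Prop := ∀ (target_string : String) (result : Option (List String)), Dom_rec_rearrange target_string result → Pre_rec_rearrange target_string result → Spec_rec_rearrange target_string result (rec_rearrange target_string result)

-- ===== LEMMAS AND PROOFS =====

theorem getLast!_cc {α : Type} [Inhabited α] (a b : α) (t : List α) :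
    (a :: b :: t).getLast! = (b :: t).getLast! := by
  unfold List.getLast!
  exact List.getLast_cons_cons

theorem getLast?_cons_some {α : Type} [Inhabited α] (x : α) (xs : List α) :
    (x :: xs).getLast? = some ((x :: xs).getLast!) := by
  unfold List.getLast!
  simp [List.getLast?_eq_some_getLast]

-- the adjacent-equal characters of cs, in order
def adjEq (cs : List Char) : List Char :=
  (cs.zip cs.tail).filterMap (fun ab => if ab.1 = ab.2 then some ab.1 else none)

theorem adjEq_cons_cons (a b : Char) (t : List Char) :
    adjEq (a :: b :: t) = (if a = b then [a] else []) ++ adjEq (b :: t) := by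
  by_cases h : a = b <;> simp [adjEq, h]

-- characterisation of A's recursion with result = none
theorem recAuxA_none (cs : List Char) (h : cs ≠ []) :
    recAuxA cs none = cs.getLast! :: (adjEq cs).reverse := by
  induction cs with
  | nil => exact absurd rfl h
  | cons a rest ih =>
    cases rest with
    | nil => simp [recAuxA, adjEq]
    | cons b t =>
      rw [recAuxA]
      simp only [List.length_cons, List.tail_cons]
      rw [ih (by simp), adjEq_cons_cons]
      by_cases hab : a = b <;> simp [hab]

theorem getLast!_map_toList (r : List String) (h : ¬ r.isEmpty = true) :
    ((r.map String.toList).getLast?.getD []) = (r.getLast!).toList := by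
  cases r with
  | nil => simp at h
  | cons x xs =>
    rw [List.getLast?_map, getLast?_cons_some]
    rfl

theorem keyLemma (cs : List Char) (result : Option (List String)) (h : ¬ cs.length ≤ 1) :
    recAuxA cs result =
      (cs.getLast! :: ((cs.tail.zip cs.tail.tail).filterMap
          (fun ab => if ab.1 = ab.2 then some ab.1 else none)).reverse) ++
        (if cs[0]! = cs[1]! then [cs[0]!]
         else match result with
           | some r => if r.isEmpty then [] else (r.getLast!).toList
           | none => []) := by
  match cs with
  | [] => simp at h
  | [a] => simp at h
  | a :: b :: u =>
    rw [recAuxA.eq_def, dif_neg h]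
    simp only [List.tail_cons]
    rw [recAuxA_none (b :: u) (by simp)]
    rw [getLast!_cc]
    simp only [List.cons_append, List.getElem!_cons_zero, List.getElem!_cons_succ]
    simp only [adjEq, List.tail_cons]
    congr 2
    by_cases hab : a = b
    · simp [hab]
    · simp only [if_neg hab]
      cases result with
      | none => simp
      | some r =>
        by_cases hr : r.isEmpty
        · simp [List.isEmpty_iff.mp hr]
        · simp only [hr, if_false, Bool.false_eq_true]
          exact getLast!_map_toList r (by simp [hr])

-- B's kept list over the whole string, split at the first pair
theorem alt_body (a b : Char) (u : List Char) :
    ((a :: b :: u).getLast! :: (adjEq (a :: b :: u)).reverse) =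
      ((b :: u).getLast! :: (adjEq (b :: u)).reverse) ++ (if a = b then [a] else []) := by
  rw [getLast!_cc, adjEq_cons_cons]
  by_cases hab : a = b <;> simp [hab]

-- ===== VERDICT =====
theorem rec_rearrange_spec : Claim_equal_rec_rearrange := by
  intro s result _ hpre
  unfold Spec_rec_rearrange rec_rearrange rec_rearrange_alt
  by_cases hlen : s.toList.length ≤ 1
  · rw [recAuxA.eq_def, dif_pos hlen, if_pos hlen]
    simp
  · rw [if_neg hlen, keyLemma s.toList result hlen]
    match hcs : s.toList with
    | [] => rw [hcs] at hlen; simp at hlen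
    | [a] => rw [hcs] at hlen; simp at hlen
    | a :: b :: u =>
      show _ = String.ofList ((a :: b :: u).getLast! :: (adjEq (a :: b :: u)).reverse)
      rw [alt_body]
      congr 1
      by_cases hab : a = b
      · simp [hab, adjEq]
      · simp only [List.getElem!_cons_zero, List.getElem!_cons_succ, if_neg hab]
        have : result.getD [] = [] := by
          by_contra hne
          rcases hpre hne with h1 | h2
          · rw [hcs] at h1; simp at h1
          · rw [hcs] at h2; simp at h2; exact hab h2
        cases result with
        | none => simp [adjEq]
        | some r =>
          simp only [Option.getD] at this
          simp [this, adjEq]
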